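-- pv_equiv track=rewrite | github.com/a-github-account/Malbolge-Amplified | Malbolge_Amplified.py | crazy_op
-- ===== SOURCE A (Python) =====
-- def crazy_op(x, y):
-- 	pow_3 = [1, 3, 9, 27, 81, 243, 729, 2187, 6561]
-- 	table = [
-- 		[2, 1, 0],
-- 		[0, 2, 1],
-- 		[1, 0, 2]
-- 	]
-- 	result = 0
-- 	for i in range(len(pow_3)):
-- 		result += table[y // pow_3[i] % 3][x // pow_3[i] % 3] * pow_3[i]
-- 	return result
-- ===== SOURCE B (Python) =====
-- def crazy_op(x, y):
-- 	# Tableless closed form: the crazy table satisfies table[b][a] == (2*(a - b + 1)) % 3,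
-- 	# and since % 3 is a ring homomorphism, the trit extraction collapses into the formula
-- 	# applied directly to the running quotients.  Recursive Horner over 9 trit positions.
-- 	def go(x, y, k):
-- 		if k == 0:
-- 			return 0
-- 		return (2 * (x - y + 1)) % 3 + 3 * go(x // 3, y // 3, k - 1)
-- 	return go(x, y, 9)
-- ===== Notes on version B (the rewrite author's own statement) =====
-- stated objective: alternative
-- what changed: Eliminates the 3x3 lookup table and the powers-of-3 positional loop entirely: B uses the closed arithmetic identity table[b][a] == (2*(a-b+1)) % 3, applied directly to the running quotients (no trit extraction needed since % 3 respects it) in a 9-step Horner-style recursion.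
import Mathlib
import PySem

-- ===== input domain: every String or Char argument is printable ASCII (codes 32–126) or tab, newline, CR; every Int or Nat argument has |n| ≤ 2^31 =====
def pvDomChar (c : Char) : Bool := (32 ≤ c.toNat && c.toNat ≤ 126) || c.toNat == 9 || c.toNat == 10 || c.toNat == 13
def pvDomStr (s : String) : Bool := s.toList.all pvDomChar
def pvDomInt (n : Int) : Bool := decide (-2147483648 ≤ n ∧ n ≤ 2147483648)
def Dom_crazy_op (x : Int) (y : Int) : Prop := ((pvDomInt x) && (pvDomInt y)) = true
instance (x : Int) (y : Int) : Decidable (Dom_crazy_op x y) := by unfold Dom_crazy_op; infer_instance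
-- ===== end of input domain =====

-- B replaces A's positional table-lookup loop by a tableless closed arithmetic formula
-- ((2*(x - y + 1)) % 3 per trit) in a Horner-style recursion; objective: alternative, same cost.

-- ===== PORT A =====
def crazy_op (x : Int) (y : Int) : Int :=
  let pow_3 : List Int := [1, 3, 9, 27, 81, 243, 729, 2187, 6561]
  let table : List (List Int) := [[2, 1, 0], [0, 2, 1], [1, 0, 2]]
  (PySem.List.pyRange 0 (Int.ofNat pow_3.length) 1).foldl (fun result i =>
    result +
      PySem.List.pyGetD
        (PySem.List.pyGetD table (PySem.Int.mod (PySem.Int.floordiv y (PySem.List.pyGetD pow_3 i 0)) 3) [])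
        (PySem.Int.mod (PySem.Int.floordiv x (PySem.List.pyGetD pow_3 i 0)) 3) 0
      * PySem.List.pyGetD pow_3 i 0) 0

-- ===== PORT B =====
-- Source B's inner `go`: Horner recursion over 9 trit positions, closed formula per trit
def crazy_go : Int → Int → Nat → Int
  | _, _, 0 => 0
  | x, y, k + 1 =>
      PySem.Int.mod (2 * (x - y + 1)) 3
        + 3 * crazy_go (PySem.Int.floordiv x 3) (PySem.Int.floordiv y 3) k

def crazy_op_alt (x : Int) (y : Int) : Int := crazy_go x y 9

-- ===== PRECONDITION & SPEC =====
def Spec_crazy_op (x : Int) (y : Int) (out : Int) : Prop := out = crazy_op_alt x y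
instance (x : Int) (y : Int) (out : Int) : Decidable (Spec_crazy_op x y out) := by unfold Spec_crazy_op; infer_instance

-- ===== CLAIM (what is proved, stated in full; the proofs are below) =====
def Claim_equal_crazy_op : Prop := ∀ (x : Int) (y : Int), Dom_crazy_op x y → Spec_crazy_op x y (crazy_op x y)

-- ===== LEMMAS AND PROOFS =====

-- the closed formula agrees with the table lookup on every pair of integers
theorem crazy_table_formula (u v : Int) :
    PySem.List.pyGetD
      (PySem.List.pyGetD ([[2, 1, 0], [0, 2, 1], [1, 0, 2]] : List (List Int)) (v % 3) [])
      (u % 3) 0 = 2 * (u - v + 1) % 3 := by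
  have hub1 : 0 ≤ u % 3 := Int.emod_nonneg u (by norm_num)
  have hub2 : u % 3 < 3 := Int.emod_lt_of_pos u (by norm_num)
  have hvb1 : 0 ≤ v % 3 := Int.emod_nonneg v (by norm_num)
  have hvb2 : v % 3 < 3 := Int.emod_lt_of_pos v (by norm_num)
  have hr : (2 * (u - v + 1)) % 3 = (2 * (u % 3 - v % 3 + 1)) % 3 := by omega
  rw [hr]
  set a := u % 3 with ha
  set b := v % 3 with hb
  interval_cases a <;> interval_cases b <;> decide
-- (decide evaluates the literal lookups and the literal emod)

-- ===== VERDICT (by name: the statement is the Claim_ definition above) =====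
theorem crazy_op_spec : Claim_equal_crazy_op := by
  intro x y _
  unfold Spec_crazy_op
  simp [crazy_op, crazy_op_alt, crazy_go, PySem.List.pyRange, List.range_succ,
        PySem.List.pyGetD_ofNat']
  have e9 : ∀ n : Int, n / 3 / 3 = n / 9 := fun n => Int.ediv_ediv_of_nonneg (by norm_num)
  have e27 : ∀ n : Int, n / 9 / 3 = n / 27 := fun n => Int.ediv_ediv_of_nonneg (by norm_num)
  have e81 : ∀ n : Int, n / 27 / 3 = n / 81 := fun n => Int.ediv_ediv_of_nonneg (by norm_num)
  have e243 : ∀ n : Int, n / 81 / 3 = n / 243 := fun n => Int.ediv_ediv_of_nonneg (by norm_num)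
  have e729 : ∀ n : Int, n / 243 / 3 = n / 729 := fun n => Int.ediv_ediv_of_nonneg (by norm_num)
  have e2187 : ∀ n : Int, n / 729 / 3 = n / 2187 := fun n => Int.ediv_ediv_of_nonneg (by norm_num)
  have e6561 : ∀ n : Int, n / 2187 / 3 = n / 6561 := fun n => Int.ediv_ediv_of_nonneg (by norm_num)
  simp only [e9, e27, e81, e243, e729, e2187, e6561, crazy_table_formula]
  ring
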